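-- pv_equiv track=rewrite | github.com/BenPalmer1983/cpp_notes | python_scripts/tidy.py | _split_braces_to_own_lines
-- ===== SOURCE A (Python) =====
-- from typing import List
--
-- def _split_braces_to_own_lines(code: str) -> str:
--     out_lines: List[str] = []
--
--     for raw_line in code.splitlines():
--         line = raw_line.rstrip('\n')
--
--         # Preprocessor lines pass through unchanged
--         if line.lstrip().startswith('#'):
--             out_lines.append(line)
--             continue
--
--         buf: List[str] = []
--         i = 0
--         in_string = None
--
--         def flush_segment():
--             seg = ''.join(buf).rstrip()
--             if seg != '':
--                 out_lines.append(seg)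
--             else:
--                 out_lines.append('')
--             buf.clear()
--
--         while i < len(line):
--             ch = line[i]
--
--             # Simple string / char literal tracking
--             if in_string:
--                 buf.append(ch)
--                 if ch == in_string:
--                     # unescaped?
--                     backslashes = 0
--                     j = i - 1
--                     while j >= 0 and line[j] == '\\':
--                         backslashes += 1
--                         j -= 1
--                     if backslashes % 2 == 0:
--                         in_string = None
--                 i += 1
--                 continue
--             else:
--                 if ch in ('"', "'"):
--                     in_string = ch
--                     buf.append(ch)
--                     i += 1
--                     continue
--
--             if ch in '{}':
--                 pre = ''.join(buf).rstrip()
--                 if pre: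
--                     out_lines.append(pre)
--                 buf.clear()
--                 out_lines.append(ch)  # brace on its own line
--                 i += 1
--                 # skip immediate spaces after a brace on same line
--                 while i < len(line) and line[i] == ' ':
--                     i += 1
--                 continue
--
--             buf.append(ch)
--             i += 1
--
--         tail = ''.join(buf).rstrip()
--         if tail != '':
--             out_lines.append(tail)
--         else:
--             out_lines.append('')
--
--     return '\n'.join(out_lines)
-- ===== SOURCE B (Python) =====
-- from typing import List, Tuple
--
-- def _scan_literal(line: str, q: str, j: int) -> int:
--     """Scan a literal body opened by quote q just before index j; return the
--     index one past its closing quote (or len(line) if unterminated).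
--     Escape = odd run of backslashes, tracked forward."""
--     bs = 0
--     n = len(line)
--     while j < n:
--         c = line[j]
--         if c == q and bs % 2 == 0:
--             return j + 1
--         bs = bs + 1 if c == '\\' else 0
--         j += 1
--     return n
--
-- def _lex(line: str) -> List[Tuple[bool, str]]:
--     """Phase 1: cut the line into literal spans (True, text) and code spans
--     (False, text)."""
--     tokens: List[Tuple[bool, str]] = []
--     i = 0
--     n = len(line)
--     while i < n:
--         if line[i] in '"\'':
--             j = _scan_literal(line, line[i], i + 1)
--             tokens.append((True, line[i:j]))
--         else:
--             j = i
--             while j < n and line[j] not in '"\'':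
--                 j += 1
--             tokens.append((False, line[i:j]))
--         i = j
--     return tokens
--
-- def _cut(tokens: List[Tuple[bool, str]], out_lines: List[str]) -> None:
--     """Phase 2: walk the spans; braces in code spans cut the line.
--     pending is a list buffer of pieces, joined when a segment is emitted."""
--     pending: List[str] = []
--     for is_lit, text in tokens:
--         if is_lit:
--             pending.append(text)
--         else:
--             k = 0
--             m = len(text)
--             while k < m:
--                 c = text[k]
--                 if c in '{}':
--                     seg = ''.join(pending).rstrip()
--                     if seg:
--                         out_lines.append(seg)
--                     pending = []
--                     out_lines.append(c)
--                     k += 1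
--                     while k < m and text[k] == ' ':  # drop spaces right after a brace
--                         k += 1
--                 else:
--                     pending.append(c)
--                     k += 1
--     out_lines.append(''.join(pending).rstrip())
--
-- def _split_braces_to_own_lines(code: str) -> str:
--     out_lines: List[str] = []
--     for line in code.splitlines():
--         if line.lstrip().startswith('#'):
--             out_lines.append(line)
--         else:
--             _cut(_lex(line), out_lines)
--     return '\n'.join(out_lines)
-- ===== Notes on version B (the rewrite author's own statement) =====
-- stated objective: alternative
-- what changed: A's single per-line character scanner (which re-counts the preceding backslash run backwards at every quote met inside a literal) is replaced by a two-phase pass: phase 1 lexes the line once into literal/code spans with a forward escape-parity counter, phase 2 walks only the code spans and cuts them at braces.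
import Mathlib
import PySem

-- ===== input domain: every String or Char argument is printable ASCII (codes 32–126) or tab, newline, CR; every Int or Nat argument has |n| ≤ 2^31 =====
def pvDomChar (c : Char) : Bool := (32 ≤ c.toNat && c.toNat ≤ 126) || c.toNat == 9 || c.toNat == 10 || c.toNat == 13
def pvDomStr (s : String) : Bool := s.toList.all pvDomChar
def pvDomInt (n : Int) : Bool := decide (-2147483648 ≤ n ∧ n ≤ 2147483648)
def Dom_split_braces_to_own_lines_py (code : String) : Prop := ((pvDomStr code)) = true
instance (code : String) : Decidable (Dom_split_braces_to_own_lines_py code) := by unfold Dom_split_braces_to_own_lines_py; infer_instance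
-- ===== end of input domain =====

-- B replaces A's one-pass char scanner (with its backward backslash re-count at every quote)
-- by a two-phase pass per line: lex the line into literal/code spans once, then cut only the
-- code spans at braces (objective: alternative decomposition; return values proved equal).

-- ===== PORT A =====
-- the backward `while j >= 0 and line[j] == '\\'` count: pvA_bs line i = backslash run ending at index i-1
def pvA_bs (line : List Char) : Nat → Nat
  | 0 => 0
  | j + 1 => if line.getD j ' ' == '\\' then pvA_bs line j + 1 else 0

-- the inner `while i < len(line) and line[i] == ' '` skip loop
def pvA_skip (line : List Char) (i : Nat) : Nat :=
  if h : i < line.length ∧ line.getD i ' ' == ' ' then pvA_skip line (i + 1) else i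
termination_by line.length - i
decreasing_by omega

-- needed for pvA_loop's termination (the index only moves forward)
theorem pvA_skip_ge (line : List Char) (i : Nat) : i ≤ pvA_skip line i := by
  unfold pvA_skip
  split
  · exact le_trans (Nat.le_succ i) (pvA_skip_ge line (i + 1))
  · exact le_refl i
termination_by line.length - i
decreasing_by rename_i h; omega

-- the `while i < len(line)` scanner of A (out_lines accumulated; tail flush at the end)
def pvA_loop (line : List Char) (i : Nat) (ins : Option Char) (buf : List Char)
    (out : List (List Char)) : List (List Char) :=
  if hi : i < line.length then
    let ch := line.getD i ' '
    match ins with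
    | some q =>
      let buf' := buf ++ [ch]
      if ch == q then
        if pvA_bs line i % 2 == 0 then pvA_loop line (i + 1) none buf' out
        else pvA_loop line (i + 1) (some q) buf' out
      else pvA_loop line (i + 1) (some q) buf' out
    | none =>
      if ch == '"' || ch == '\'' then
        pvA_loop line (i + 1) (some ch) (buf ++ [ch]) out
      else if ch == '{' || ch == '}' then
        let pre := PySem.Chars.rstrip buf
        let out' := if pre.isEmpty then out else out ++ [pre]
        pvA_loop line (pvA_skip line (i + 1)) none [] (out' ++ [[ch]])
      else
        pvA_loop line (i + 1) none (buf ++ [ch]) out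
  else
    let tail := PySem.Chars.rstrip buf
    if tail.isEmpty then out ++ [[]] else out ++ [tail]
termination_by line.length - i
decreasing_by
  all_goals (have := pvA_skip_ge line (i + 1); omega)

-- line.rstrip('\n'): ported by hand (exact: drops trailing '\n' characters only)
def pvRstripNl (cs : List Char) : List Char := (cs.reverse.dropWhile (· == '\n')).reverse

def pvA_line (out : List (List Char)) (raw : List Char) : List (List Char) :=
  let line := pvRstripNl raw
  if PySem.Chars.startswith (PySem.Chars.lstrip line) ['#'] then out ++ [line]
  else pvA_loop line 0 none [] out

def split_braces_to_own_lines_py (code : String) : String :=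
  String.ofList (PySem.Chars.join ['\n'] ((PySem.Chars.splitlines code.toList).foldl pvA_line []))

-- ===== PORT B =====
def pvB_isQuote (c : Char) : Bool := c == '"' || c == '\''

-- _scan_literal: consume a literal body; forward escape parity in bs
def pvB_lit (q : Char) (rest : List Char) (bs : Nat) : List Char × List Char :=
  match rest with
  | [] => ([], [])
  | c :: r =>
    if c == q && bs % 2 == 0 then ([c], r)
    else
      let p := pvB_lit q r (if c == '\\' then bs + 1 else 0)
      (c :: p.1, p.2)

-- needed for pvB_lex's termination
theorem pvB_lit_len (q : Char) (rest : List Char) (bs : Nat) :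
    (pvB_lit q rest bs).2.length ≤ rest.length := by
  induction rest generalizing bs with
  | nil => simp [pvB_lit]
  | cons c r ih =>
    simp only [pvB_lit]
    split
    · simp
    · simpa using le_trans (ih _) (Nat.le_succ _)

-- _lex: phase 1, cut the line into literal spans (true, text) and code spans (false, text)
def pvB_lex (line : List Char) : List (Bool × List Char) :=
  match line with
  | [] => []
  | c :: rest =>
    if pvB_isQuote c then
      let p := pvB_lit c rest 0
      (true, c :: p.1) :: pvB_lex p.2
    else
      (false, (c :: rest).takeWhile (fun d => !pvB_isQuote d)) ::
        pvB_lex ((c :: rest).dropWhile (fun d => !pvB_isQuote d))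
termination_by line.length
decreasing_by
  · have := pvB_lit_len c rest 0; simp; omega
  · rename_i h
    have := List.length_dropWhile_le (fun d => !pvB_isQuote d) rest
    rw [List.dropWhile_cons]
    simp only [h]
    simp; omega

-- _cut's inner while over one code span
def pvB_code (text : List Char) (pending : List Char) (out : List (List Char)) :
    List Char × List (List Char) :=
  match text with
  | [] => (pending, out)
  | c :: rest =>
    if c == '{' || c == '}' then
      let seg := PySem.Chars.rstrip pending
      let out' := if seg.isEmpty then out else out ++ [seg]
      pvB_code (rest.dropWhile (· == ' ')) [] (out' ++ [[c]])
    else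
      pvB_code rest (pending ++ [c]) out
termination_by text.length
decreasing_by
  · have := List.length_dropWhile_le (fun d => d == ' ') rest; simp at *; omega
  · simp

-- _cut: phase 2, fold over the spans
def pvB_cut (tokens : List (Bool × List Char)) (pending : List Char)
    (out : List (List Char)) : List (List Char) :=
  match tokens with
  | [] => out ++ [PySem.Chars.rstrip pending]
  | (isLit, text) :: ts =>
    if isLit then pvB_cut ts (pending ++ text) out
    else
      let p := pvB_code text pending out
      pvB_cut ts p.1 p.2

def pvB_line (out : List (List Char)) (line : List Char) : List (List Char) :=
  if PySem.Chars.startswith (PySem.Chars.lstrip line) ['#'] then out ++ [line]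
  else pvB_cut (pvB_lex line) [] out

def split_braces_to_own_lines_py_alt (code : String) : String :=
  String.ofList (PySem.Chars.join ['\n'] ((PySem.Chars.splitlines code.toList).foldl pvB_line []))

-- ===== PRECONDITION & SPEC =====
def Spec_split_braces_to_own_lines_py (code : String) (out : String) : Prop := out = split_braces_to_own_lines_py_alt code
instance (code : String) (out : String) : Decidable (Spec_split_braces_to_own_lines_py code out) := by unfold Spec_split_braces_to_own_lines_py; infer_instance

-- ===== CLAIM (what is proved, stated in full; the proofs are below) =====
def Claim_equal_split_braces_to_own_lines_py : Prop := ∀ (code : String), Dom_split_braces_to_own_lines_py code → Spec_split_braces_to_own_lines_py code (split_braces_to_own_lines_py code)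

-- ===== LEMMAS AND PROOFS =====

-- reference scanner: A's loop rephrased on the remaining suffix, with forward escape parity
def pvR (cs : List Char) (ins : Option (Char × Nat)) (buf : List Char)
    (out : List (List Char)) : List (List Char) :=
  match cs with
  | [] => out ++ [PySem.Chars.rstrip buf]
  | c :: r =>
    match ins with
    | some (q, bs) =>
      if c == q && bs % 2 == 0 then pvR r none (buf ++ [c]) out
      else pvR r (some (q, if c == '\\' then bs + 1 else 0)) (buf ++ [c]) out
    | none =>
      if pvB_isQuote c then pvR r (some (c, 0)) (buf ++ [c]) out
      else if c == '{' || c == '}' then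
        pvR (r.dropWhile (· == ' ')) none []
          ((if (PySem.Chars.rstrip buf).isEmpty then out else out ++ [PySem.Chars.rstrip buf]) ++ [[c]])
      else pvR r none (buf ++ [c]) out
termination_by cs.length
decreasing_by
  · simp
  · simp
  · simp
  · have := List.length_dropWhile_le (fun d => d == ' ') r; simp at *; omega
  · simp

theorem drop_pvA_skip (line : List Char) (i : Nat) :
    line.drop (pvA_skip line i) = (line.drop i).dropWhile (· == ' ') := by
  unfold pvA_skip
  split
  · rename_i h
    have hd : line.drop i = line.getD i ' ' :: line.drop (i + 1) := by
      rw [List.getD_eq_getElem _ _ h.1]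
      exact List.drop_eq_getElem_cons h.1
    rw [drop_pvA_skip line (i + 1), hd, List.dropWhile_cons]
    simp only [h.2, if_true]
  · rename_i h
    by_cases hlt : i < line.length
    · have hd : line.drop i = line.getD i ' ' :: line.drop (i + 1) := by
        rw [List.getD_eq_getElem _ _ hlt]
        exact List.drop_eq_getElem_cons hlt
      have hsp : ¬ (line.getD i ' ' == ' ') = true := fun hc => h ⟨hlt, hc⟩
      rw [hd, List.dropWhile_cons, if_neg hsp]
    · rw [List.drop_eq_nil_of_le (by omega)]
      simp
termination_by line.length - i
decreasing_by rename_i h; omega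

theorem pvA_bs_succ (line : List Char) (i : Nat) :
    pvA_bs line (i + 1) = if line.getD i ' ' == '\\' then pvA_bs line i + 1 else 0 := rfl

theorem pvA_loop_eq_pvR (n : Nat) : ∀ (line : List Char) (i : Nat) (ins : Option (Char × Nat))
    (buf : List Char) (out : List (List Char)), line.length - i = n →
    (∀ q bs, ins = some (q, bs) → pvA_bs line i % 2 = bs % 2) →
    pvA_loop line i (ins.map Prod.fst) buf out = pvR (line.drop i) ins buf out := by
  induction n using Nat.strong_induction_on with
  | _ n IH =>
  intro line i ins buf out hn hpar
  by_cases hi : i < line.length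
  case neg =>
    rw [List.drop_eq_nil_of_le (by omega)]
    unfold pvA_loop
    rw [dif_neg hi]
    by_cases he : (PySem.Chars.rstrip buf).isEmpty
    · simp [pvR, List.isEmpty_iff.mp he]
    · simp [pvR, he]
  case pos =>
    have hd : line.drop i = line.getD i ' ' :: line.drop (i + 1) := by
      rw [List.getD_eq_getElem _ _ hi]
      exact List.drop_eq_getElem_cons hi
    have hn1 : line.length - (i + 1) < n := by omega
    rw [hd]
    unfold pvA_loop
    rw [dif_pos hi]
    cases ins with
    | some p =>
      obtain ⟨q, bs⟩ := p
      have hp : pvA_bs line i % 2 = bs % 2 := hpar q bs rfl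
      simp only [Option.map_some]
      by_cases hq : (line.getD i ' ' == q) = true
      · by_cases hev : (bs % 2 == 0) = true
        · have hev' : (pvA_bs line i % 2 == 0) = true := by
            rw [beq_iff_eq] at hev ⊢; omega
          simp only [pvR, hq, hev, hev', Bool.and_self, if_pos]
          exact IH _ hn1 line (i + 1) none _ out rfl (by simp)
        · have hev' : ¬ (pvA_bs line i % 2 == 0) = true := by
            rw [beq_iff_eq] at hev ⊢; omega
          simp only [pvR, hq, if_neg hev, if_neg hev', Bool.true_and]
          have := IH _ hn1 line (i + 1) (some (q, if line.getD i ' ' == '\\' then bs + 1 else 0)) (buf ++ [line.getD i ' ']) out rfl (by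
            intro q' bs' hqe
            injection hqe with hqe
            injection hqe with h1 h2
            subst h1; subst h2
            rw [pvA_bs_succ]
            by_cases hbsl : (line.getD i ' ' == '\\') = true
            · simp only [hbsl, if_true]; omega
            · simp only [hbsl]; simp)
          simpa using this
      · simp only [pvR, hq, Bool.false_and, Bool.false_eq_true, if_false]
        have := IH _ hn1 line (i + 1) (some (q, if line.getD i ' ' == '\\' then bs + 1 else 0)) (buf ++ [line.getD i ' ']) out rfl (by
          intro q' bs' hqe
          injection hqe with hqe
          injection hqe with h1 h2
          subst h1; subst h2
          rw [pvA_bs_succ]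
          by_cases hbsl : (line.getD i ' ' == '\\') = true
          · simp only [hbsl, if_true]; omega
          · simp only [hbsl]; simp)
        simpa using this
    | none =>
      simp only [Option.map_none]
      by_cases hquote : (line.getD i ' ' == '"' || line.getD i ' ' == '\'') = true
      · simp only [pvR, pvB_isQuote, hquote, if_pos]
        have hnb : ¬ (line.getD i ' ' == '\\') = true := by
          rcases Bool.or_eq_true_iff.mp hquote with h | h <;>
            (rw [beq_iff_eq] at h; rw [beq_iff_eq, h]; decide)
        exact IH _ hn1 line (i + 1) (some (line.getD i ' ', 0)) _ out rfl (by
          intro q' bs' hqe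
          injection hqe with hqe
          injection hqe with h1 h2
          subst h1; subst h2
          rw [pvA_bs_succ, if_neg hnb])
      · by_cases hbrace : (line.getD i ' ' == '{' || line.getD i ' ' == '}') = true
        · simp only [pvR, pvB_isQuote, hquote, hbrace, if_pos, Bool.false_eq_true]
          have hsk : i + 1 ≤ pvA_skip line (i + 1) := pvA_skip_ge line (i + 1)
          have hm : line.length - pvA_skip line (i + 1) < n := by omega
          have := IH _ hm line (pvA_skip line (i + 1)) none []
            ((if (PySem.Chars.rstrip buf).isEmpty then out else out ++ [PySem.Chars.rstrip buf]) ++ [[line.getD i ' ']]) rfl (by simp)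
          rw [drop_pvA_skip] at this
          simpa using this
        · simp only [pvR, pvB_isQuote, hquote, hbrace, Bool.false_eq_true, if_false]
          exact IH _ hn1 line (i + 1) none _ out rfl (by simp)

theorem pvR_lit (cs : List Char) : ∀ (q : Char) (bs : Nat) (buf : List Char)
    (out : List (List Char)),
    pvR cs (some (q, bs)) buf out =
      pvR (pvB_lit q cs bs).2 none (buf ++ (pvB_lit q cs bs).1) out := by
  induction cs with
  | nil => intro q bs buf out; simp [pvR, pvB_lit]
  | cons c r ih =>
    intro q bs buf out
    by_cases hc : (c == q && bs % 2 == 0) = true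
    · simp [pvR, pvB_lit, hc]
    · simp only [pvR, pvB_lit, hc, Bool.false_eq_true, if_false]
      rw [ih]
      simp

theorem pvR_code (n : Nat) : ∀ (t rest pending : List Char) (out : List (List Char)),
    t.length = n →
    (∀ c ∈ t, pvB_isQuote c = false) →
    (rest = [] ∨ ∃ c r, rest = c :: r ∧ pvB_isQuote c = true) →
    pvR (t ++ rest) none pending out =
      pvR rest none (pvB_code t pending out).1 (pvB_code t pending out).2 := by
  induction n using Nat.strong_induction_on with
  | _ n IH =>
  intro t rest pending out hn ht hrest
  have hrdw : rest.dropWhile (· == ' ') = rest := by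
    rcases hrest with rfl | ⟨c0, r0, rfl, hq0⟩
    · rfl
    · rw [List.dropWhile_cons, if_neg]
      rcases (by simpa [pvB_isQuote] using hq0 : c0 = '"' ∨ c0 = '\'') with rfl | rfl <;> decide
  cases t with
  | nil => simp [pvB_code]
  | cons c t' =>
    have hcq : pvB_isQuote c = false := ht c (by simp)
    by_cases hb : (c == '{' || c == '}') = true
    · have hdw : (t' ++ rest).dropWhile (· == ' ') = t'.dropWhile (· == ' ') ++ rest := by
        rw [List.dropWhile_append]
        split
        · rename_i hemp
          rw [List.isEmpty_iff.mp hemp, hrdw]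
          simp
        · rfl
      simp only [List.cons_append, pvR, pvB_code, hcq, hb, if_true, Bool.false_eq_true]
      rw [hdw]
      have hlen : (t'.dropWhile (· == ' ')).length < n := by
        have := List.length_dropWhile_le (· == ' ') t'
        simp at hn; omega
      exact IH _ hlen (t'.dropWhile (· == ' ')) rest []
        ((if (PySem.Chars.rstrip pending).isEmpty then out else out ++ [PySem.Chars.rstrip pending]) ++ [[c]]) rfl
        (fun d hd => ht d (List.mem_cons_of_mem c ((List.dropWhile_sublist _).subset hd))) hrest
    · simp only [List.cons_append, pvR, pvB_code, hcq, hb, Bool.false_eq_true]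
      have hlen : t'.length < n := by simp at hn; omega
      exact IH _ hlen t' rest (pending ++ [c]) out rfl
        (fun d hd => ht d (List.mem_cons_of_mem c hd)) hrest

theorem pvR_eq_cut (n : Nat) : ∀ (cs pending : List Char) (out : List (List Char)),
    cs.length = n →
    pvR cs none pending out = pvB_cut (pvB_lex cs) pending out := by
  induction n using Nat.strong_induction_on with
  | _ n IH =>
  intro cs pending out hn
  cases cs with
  | nil => simp [pvR, pvB_lex, pvB_cut]
  | cons c r =>
    by_cases hq : pvB_isQuote c = true
    · simp only [pvR, pvB_lex, pvB_cut, hq, if_true]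
      rw [pvR_lit]
      have hlen : (pvB_lit c r 0).2.length < n := by
        have := pvB_lit_len c r 0
        simp at hn; omega
      rw [IH _ hlen _ _ _ rfl]
      simp
    · have hp : (fun d => !pvB_isQuote d) c = true := by simp [hq]
      have hsplit : c :: r =
          (c :: r).takeWhile (fun d => !pvB_isQuote d) ++ (c :: r).dropWhile (fun d => !pvB_isQuote d) :=
        (List.takeWhile_append_dropWhile ..).symm
      have hrest : (c :: r).dropWhile (fun d => !pvB_isQuote d) = [] ∨
          ∃ c0 r0, (c :: r).dropWhile (fun d => !pvB_isQuote d) = c0 :: r0 ∧ pvB_isQuote c0 = true := by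
        cases hdw : (c :: r).dropWhile (fun d => !pvB_isQuote d) with
        | nil => exact Or.inl rfl
        | cons c0 r0 =>
          refine Or.inr ⟨c0, r0, rfl, ?_⟩
          have := List.head_dropWhile_not (fun d => !pvB_isQuote d) (l := c :: r) (by simp [hdw])
          simpa [hdw] using this
      have hlen : ((c :: r).dropWhile (fun d => !pvB_isQuote d)).length < n := by
        rw [List.dropWhile_cons]
        simp only [hp, if_pos]
        have := List.length_dropWhile_le (fun d => !pvB_isQuote d) r
        simp at hn; omega
      conv_lhs => rw [hsplit]
      rw [pvR_code (((c :: r).takeWhile (fun d => !pvB_isQuote d)).length) _ _ _ _ rfl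
        (fun d hd => by simpa using List.mem_takeWhile_imp hd) hrest]
      rw [IH _ hlen _ _ _ rfl]
      conv_rhs => rw [pvB_lex]
      simp only [hq, Bool.false_eq_true, if_false, pvB_cut]

theorem pvRstripNl_of_no_nl (l : List Char) (h : ∀ c ∈ l, c ≠ '\n') : pvRstripNl l = l := by
  unfold pvRstripNl
  rw [List.dropWhile_eq_self_iff.mpr, List.reverse_reverse]
  intro hl
  have hm : l.reverse[0] ∈ l := List.mem_reverse.mp (List.getElem_mem hl)
  simpa using h _ hm

theorem pvA_line_eq_pvB_line (out : List (List Char)) (l : List Char)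
    (h : ∀ c ∈ l, c ≠ '\n') : pvA_line out l = pvB_line out l := by
  simp only [pvA_line, pvB_line]
  rw [pvRstripNl_of_no_nl l h]
  by_cases hpre : PySem.Chars.startswith (PySem.Chars.lstrip l) ['#'] = true
  · rw [if_pos hpre, if_pos hpre]
  · rw [if_neg hpre, if_neg hpre]
    have hA := pvA_loop_eq_pvR (l.length - 0) l 0 none [] out rfl (by simp)
    rw [List.drop_zero] at hA
    simpa using hA.trans (pvR_eq_cut l.length l [] out rfl)

theorem pv_go_inv (isB : Char → Bool) (s cur : List Char) (acc : List (List Char))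
    (hcur : ∀ c ∈ cur, isB c = false) (hacc : ∀ l ∈ acc, ∀ c ∈ l, isB c = false) :
    ∀ l ∈ PySem.Chars.splitlines.go isB s cur acc, ∀ c ∈ l, isB c = false := by
  have hpush : ∀ l ∈ cur.reverse :: acc, ∀ c ∈ l, isB c = false := by
    intro l hl
    rcases List.mem_cons.mp hl with h | h
    · exact h ▸ fun c hc => hcur c (List.mem_reverse.mp hc)
    · exact hacc l h
  cases s with
  | nil =>
    rw [PySem.Chars.splitlines.go.eq_1]
    split
    · exact fun l hl => hacc l (List.mem_reverse.mp hl)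
    · exact fun l hl => hpush l (List.mem_reverse.mp hl)
  | cons c rest =>
    cases rest with
    | nil =>
      rw [PySem.Chars.splitlines.go.eq_3 isB cur acc c [] (by intro r _ hr; cases hr)]
      split
      · exact pv_go_inv isB [] [] (cur.reverse :: acc) (by simp) hpush
      · rename_i hc
        exact pv_go_inv isB [] (c :: cur) acc
          (by
            intro d hd
            rcases List.mem_cons.mp hd with h | h
            · simpa [h] using hc
            · exact hcur d h) hacc
    | cons c2 rest2 =>
      by_cases h2 : c = '\x0d' ∧ c2 = '\n'
      · obtain ⟨rfl, rfl⟩ := h2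
        rw [PySem.Chars.splitlines.go.eq_2]
        exact pv_go_inv isB rest2 [] (cur.reverse :: acc) (by simp) hpush
      · rw [PySem.Chars.splitlines.go.eq_3 isB cur acc c (c2 :: rest2) (by
          intro r hc hr
          exact h2 ⟨hc, (List.cons_eq_cons.mp hr).1⟩)]
        split
        · exact pv_go_inv isB (c2 :: rest2) [] (cur.reverse :: acc) (by simp) hpush
        · rename_i hc
          exact pv_go_inv isB (c2 :: rest2) (c :: cur) acc
            (by
              intro d hd
              rcases List.mem_cons.mp hd with h | h
              · simpa [h] using hc
              · exact hcur d h) hacc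
termination_by s.length

theorem splitlines_no_nl (cs : List Char) :
    ∀ l ∈ PySem.Chars.splitlines cs, ∀ c ∈ l, c ≠ '\n' := by
  intro l hl c hc heq
  unfold PySem.Chars.splitlines at hl
  have := pv_go_inv _ cs [] [] (by simp) (by simp) l hl c hc
  rw [heq] at this
  simp at this

-- ===== VERDICT (by name: the statement is the Claim_ definition above) =====
theorem split_braces_to_own_lines_py_spec : Claim_equal_split_braces_to_own_lines_py := by
  intro code _
  unfold Spec_split_braces_to_own_lines_py split_braces_to_own_lines_py split_braces_to_own_lines_py_alt
  have := PySem.List.foldl_congr_mem (PySem.Chars.splitlines code.toList) pvA_line pvB_line []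
    (fun acc l hl => pvA_line_eq_pvB_line acc l (splitlines_no_nl code.toList l hl))
  rw [this]
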